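-- pv_equiv track=rewrite | github.com/hub2nature/Stock_earnings_call_transcript | grpo_rlaif_infer.py | prepared_remarks_only
-- ===== SOURCE A (Python) =====
-- def prepared_remarks_only(flat):
--     start, out = False, []
--     for s in flat:
--         s_low = s.lower()
--         if not start and (s_low.startswith("unknown") or "good" in s_low or "hello" in s_low):
--             start = True
--         if s_low.strip() == "question-and-answer session": break
--         if start: out.append(s)
--     return out or flat
-- ===== SOURCE B (Python) =====
-- def _is_qa_break(s):
--     return s.lower().strip() == "question-and-answer session"
--
--
-- def _is_speaker_start(s):
--     low = s.lower()
--     return low.startswith("unknown") or "good" in low or "hello" in low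
--
--
-- def prepared_remarks_only(flat):
--     # take everything before the Q&A break, then drop lines before the first speaker marker
--     before_qa = []
--     for s in flat:
--         if _is_qa_break(s):
--             break
--         before_qa.append(s)
--     i = 0
--     while i < len(before_qa) and not _is_speaker_start(before_qa[i]):
--         i += 1
--     out = before_qa[i:]
--     return out if out else flat
-- ===== Notes on version B (the rewrite author's own statement) =====
-- stated objective: simpler
-- what changed: Replaces A's fused single pass with a stateful start flag by a take-until-Q&A-break phase followed by a drop-until-first-speaker-marker phase, then the empty fallback.
import Mathlib
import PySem

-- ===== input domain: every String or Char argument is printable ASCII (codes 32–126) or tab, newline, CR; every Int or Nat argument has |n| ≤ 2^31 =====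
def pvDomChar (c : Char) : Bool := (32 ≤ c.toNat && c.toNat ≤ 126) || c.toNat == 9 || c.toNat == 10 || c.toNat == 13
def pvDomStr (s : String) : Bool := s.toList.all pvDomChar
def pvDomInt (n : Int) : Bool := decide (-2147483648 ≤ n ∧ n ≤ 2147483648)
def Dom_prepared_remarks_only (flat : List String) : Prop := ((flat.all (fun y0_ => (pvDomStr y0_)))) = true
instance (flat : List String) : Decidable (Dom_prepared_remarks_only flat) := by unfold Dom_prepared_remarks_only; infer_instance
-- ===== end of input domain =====

-- B replaces A's fused single pass with a stateful flag by take-until-Q&A-break then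
-- drop-until-first-speaker-marker (objective: simpler decomposition; same O(n) cost).

-- ===== PORT A =====
-- the for-loop with `start`/`out` state and `break`
def prepared_remarks_only_go (start : Bool) (out : List String) : List String → List String
  | [] => out
  | s :: rest =>
    let sLow := PySem.Str.lower s
    let start' := if !start && (PySem.Str.startswith sLow "unknown" ||
        PySem.Str.isIn "good" sLow || PySem.Str.isIn "hello" sLow) then true else start
    if PySem.Str.strip sLow == "question-and-answer session" then out
    else prepared_remarks_only_go start' (if start' then out ++ [s] else out) rest

def prepared_remarks_only (flat : List String) : List String :=
  let out := prepared_remarks_only_go false [] flat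
  if out.isEmpty then flat else out   -- `return out or flat`

-- ===== PORT B =====
def pvIsQaBreak (s : String) : Bool :=
  PySem.Str.strip (PySem.Str.lower s) == "question-and-answer session"

def pvIsSpeakerStart (s : String) : Bool :=
  let low := PySem.Str.lower s
  PySem.Str.startswith low "unknown" || PySem.Str.isIn "good" low || PySem.Str.isIn "hello" low

-- the `before_qa` loop with break
def pvBeforeQa : List String → List String
  | [] => []
  | s :: r => if pvIsQaBreak s then [] else s :: pvBeforeQa r

-- the `while` loop advancing i, followed by `before_qa[i:]`
def pvDropUntilStart : List String → List String
  | [] => []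
  | s :: r => if pvIsSpeakerStart s then s :: r else pvDropUntilStart r

def prepared_remarks_only_alt (flat : List String) : List String :=
  let out := pvDropUntilStart (pvBeforeQa flat)
  if out.isEmpty then flat else out

-- ===== PRECONDITION & SPEC =====
def Spec_prepared_remarks_only (flat : List String) (out : List String) : Prop := out = prepared_remarks_only_alt flat
instance (flat : List String) (out : List String) : Decidable (Spec_prepared_remarks_only flat out) := by unfold Spec_prepared_remarks_only; infer_instance

-- ===== CLAIM (what is proved, stated in full; the proofs are below) =====
def Claim_equal_prepared_remarks_only : Prop := ∀ (flat : List String), Dom_prepared_remarks_only flat → Spec_prepared_remarks_only flat (prepared_remarks_only flat)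

-- ===== LEMMAS AND PROOFS =====
theorem pv_go_true (l : List String) (out : List String) :
    prepared_remarks_only_go true out l = out ++ pvBeforeQa l := by
  induction l generalizing out with
  | nil => simp [prepared_remarks_only_go, pvBeforeQa]
  | cons s r ih =>
    simp only [prepared_remarks_only_go, pvBeforeQa, pvIsQaBreak]
    by_cases h : (PySem.Str.strip (PySem.Str.lower s) == "question-and-answer session") = true
    · simp [h]
    · simp [h, ih]

theorem pv_go_false (l : List String) :
    prepared_remarks_only_go false [] l = pvDropUntilStart (pvBeforeQa l) := by
  induction l with
  | nil => simp [prepared_remarks_only_go, pvBeforeQa, pvDropUntilStart]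
  | cons s r ih =>
    by_cases hst : pvIsSpeakerStart s = true <;> by_cases hqa : pvIsQaBreak s = true <;>
      simp only [pvIsSpeakerStart, pvIsQaBreak] at hst hqa <;>
      simp at hst hqa <;>
      simp [prepared_remarks_only_go, pvBeforeQa, pvDropUntilStart, pvIsSpeakerStart,
        pvIsQaBreak, hst, hqa, pv_go_true, ih]

-- ===== VERDICT (by name: the statement is the Claim_ definition above) =====
theorem prepared_remarks_only_spec : Claim_equal_prepared_remarks_only := by
  intro flat _
  unfold Spec_prepared_remarks_only prepared_remarks_only prepared_remarks_only_alt
  simp [pv_go_false]
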